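-- pv_equiv track=rewrite | github.com/SimonKvalheim/guttakrutt-NMiAI | grocery-bot/strategy.py | _count_useful
-- ===== SOURCE A (Python) =====
-- def _count_useful(inventory: list[str], needed: dict[str, int]) -> int:
--     """Count how many inventory items match the active order's needs."""
--     remaining = dict(needed)
--     count = 0
--     for item_type in inventory:
--         if item_type in remaining and remaining[item_type] > 0:
--             remaining[item_type] -= 1
--             count += 1
--     return count
-- ===== SOURCE B (Python) =====
-- def _count_useful(inventory: list[str], needed: dict[str, int]) -> int:
--     """Count how many inventory items match the active order's needs."""
--     inv = {}
--     for t in inventory: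
--         inv[t] = inv.get(t, 0) + 1
--     return sum(min(inv.get(t, 0), c) for t, c in needed.items() if c > 0)
-- ===== Notes on version B (the rewrite author's own statement) =====
-- stated objective: idiomatic
-- what changed: Replaces A's ordered budget-decrementing walk over the inventory (mutating a copy of needed) with a frequency table of the inventory built once and a sum of min(count, need) over the positive needs.
import Mathlib
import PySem

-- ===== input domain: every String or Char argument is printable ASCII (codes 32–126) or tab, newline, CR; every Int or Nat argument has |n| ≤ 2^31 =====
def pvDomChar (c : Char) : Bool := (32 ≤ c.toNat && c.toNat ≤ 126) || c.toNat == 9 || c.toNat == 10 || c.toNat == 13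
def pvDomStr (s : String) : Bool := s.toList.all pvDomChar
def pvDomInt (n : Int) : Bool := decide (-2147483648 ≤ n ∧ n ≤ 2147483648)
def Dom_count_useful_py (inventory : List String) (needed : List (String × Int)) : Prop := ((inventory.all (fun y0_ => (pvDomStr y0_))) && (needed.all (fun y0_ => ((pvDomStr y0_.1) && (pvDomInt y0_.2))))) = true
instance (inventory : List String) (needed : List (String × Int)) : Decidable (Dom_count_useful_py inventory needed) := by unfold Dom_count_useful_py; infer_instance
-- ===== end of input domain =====

-- B builds a frequency table of the inventory once and sums min(count, need) over the needs (idiomatic counter formulation) instead of A's budget-decrementing walk over the inventory.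


-- ===== PORT A =====
-- loop body of A: if item_type in remaining and remaining[item_type] > 0: decrement and count
def cuStepA (st : PySem.Dict String Int × Int) (item : String) : PySem.Dict String Int × Int :=
  if st.1.contains item && decide (0 < st.1.getD item 0) then
    (st.1.insert item (st.1.getD item 0 - 1), st.2 + 1)
  else st

def count_useful_py (inventory : List String) (needed : List (String × Int)) : Int :=
  (inventory.foldl cuStepA (PySem.Dict.ofList needed, 0)).2

-- ===== PORT B =====
def count_useful_py_alt (inventory : List String) (needed : List (String × Int)) : Int :=
  let inv := inventory.foldl (fun d t => d.insert t (d.getD t 0 + 1)) PySem.Dict.empty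
  ((((PySem.Dict.ofList needed).items.filter (fun p => decide (0 < p.2))).map
      (fun p => min (inv.getD p.1 0) p.2)).sum)

-- ===== PRECONDITION & SPEC =====
def Spec_count_useful_py (inventory : List String) (needed : List (String × Int)) (out : Int) : Prop := out = count_useful_py_alt inventory needed
instance (inventory : List String) (needed : List (String × Int)) (out : Int) : Decidable (Spec_count_useful_py inventory needed out) := by unfold Spec_count_useful_py; infer_instance

-- ===== CLAIM (what is proved, stated in full; the proofs are below) =====
def Claim_equal_count_useful_py : Prop := ∀ (inventory : List String) (needed : List (String × Int)), Dom_count_useful_py inventory needed → Spec_count_useful_py inventory needed (count_useful_py inventory needed)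

-- ===== LEMMAS AND PROOFS =====

-- the per-key value of the remaining count: what A's loop will still add for key k while scanning inv
def cuS (rem : PySem.Dict String Int) (inv : List String) : Int :=
  (rem.keys.map (fun k => if 0 < rem.getD k 0 then min ((inv.count k : Int)) (rem.getD k 0) else 0)).sum

lemma sum_map_congr_mem {α : Type} (l : List α) (f g : α → Int)
    (h : ∀ a ∈ l, f a = g a) : (l.map f).sum = (l.map g).sum := by
  rw [List.map_congr_left h]

lemma sum_map_update_one {α : Type} [DecidableEq α] (l : List α) (f g : α → Int) (x : α)
    (hx : x ∈ l) (hnd : l.Nodup) (hfg : ∀ a ∈ l, a ≠ x → f a = g a) (hx1 : f x = g x + 1) :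
    (l.map f).sum = (l.map g).sum + 1 := by
  induction l with
  | nil => cases hx
  | cons a l ih =>
    simp only [List.map_cons, List.sum_cons]
    rcases List.mem_cons.mp hx with rfl | hmem
    · have : (l.map f).sum = (l.map g).sum := by
        apply sum_map_congr_mem
        intro b hb
        exact hfg b (List.mem_cons_of_mem _ hb) (fun hbx => (List.nodup_cons.mp hnd).1 (hbx ▸ hb))
      rw [hx1, this]; ring
    · have hax : a ≠ x := fun h => (List.nodup_cons.mp hnd).1 (h ▸ hmem)
      rw [hfg a (List.mem_cons_self) hax,
        ih hmem (List.nodup_cons.mp hnd).2 (fun b hb => hfg b (List.mem_cons_of_mem _ hb))]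
      ring

-- the invariant of A's loop: its count grows by exactly cuS of the current remaining dict
lemma loopA_eq (inv : List String) (rem : PySem.Dict String Int) (c : Int)
    (hnd : rem.keys.Nodup) :
    (inv.foldl cuStepA (rem, c)).2 = c + cuS rem inv := by
  induction inv generalizing rem c with
  | nil =>
    simp only [List.foldl_nil, cuS]
    rw [sum_map_congr_mem _ _ (fun _ => (0 : Int))
      (by intro k _; simp only [List.count_nil, Nat.cast_zero, min_def]; split_ifs <;> omega)]
    simp
  | cons x xs ih =>
    simp only [List.foldl_cons]
    by_cases hc : rem.contains x = true ∧ 0 < rem.getD x 0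
    · have hstep : cuStepA (rem, c) x = (rem.insert x (rem.getD x 0 - 1), c + 1) := by
        simp [cuStepA, hc.1, hc.2]
      rw [hstep, ih _ _ (PySem.Dict.nodup_keys_insert _ _ _ hnd)]
      have hkeys : (rem.insert x (rem.getD x 0 - 1)).keys = rem.keys :=
        PySem.Dict.keys_insert_of_contains _ _ hc.1
      have hxmem : x ∈ rem.keys := (PySem.Dict.contains_iff_mem_keys _ _).mp hc.1
      have hS : cuS rem (x :: xs) = cuS (rem.insert x (rem.getD x 0 - 1)) xs + 1 := by
        unfold cuS
        rw [hkeys]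
        apply sum_map_update_one _ _ _ x hxmem hnd
        · intro k hk hkx
          have hcnt : List.count k (x :: xs) = List.count k xs := by
            simp [Ne.symm hkx]
          rw [PySem.Dict.getD_insert, if_neg hkx, hcnt]
        · have hv := hc.2
          rw [PySem.Dict.getD_insert, if_pos rfl, List.count_cons, if_pos (beq_self_eq_true x)]
          push_cast
          simp only [min_def]
          split_ifs <;> omega
      rw [hS]; ring
    · have hstep : cuStepA (rem, c) x = (rem, c) := by
        unfold cuStepA
        rw [if_neg]
        simp only [Bool.and_eq_true, decide_eq_true_eq]
        exact hc
      rw [hstep, ih _ _ hnd]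
      have hS : cuS rem (x :: xs) = cuS rem xs := by
        unfold cuS
        apply sum_map_congr_mem
        intro k hk
        by_cases hkx : k = x
        · subst hkx
          have hcont : rem.contains k = true := (PySem.Dict.contains_iff_mem_keys _ _).mpr hk
          have hv : ¬ 0 < rem.getD k 0 := fun hv => hc ⟨hcont, hv⟩
          rw [if_neg hv, if_neg hv]
        · have hck : List.count k (x :: xs) = List.count k xs := by simp [Ne.symm hkx]
          simp only [hck]
      rw [hS]

-- B's filtered-items sum equals cuS of the same dict
lemma alt_eq_cuS (inventory : List String) (needed : List (String × Int)) :
    count_useful_py_alt inventory needed = cuS (PySem.Dict.ofList needed) inventory := by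
  unfold count_useful_py_alt cuS
  have hnd : (PySem.Dict.ofList needed).keys.Nodup := PySem.Dict.nodup_keys_ofList needed
  have hcnt : ∀ t : String,
      (inventory.foldl (fun d t => d.insert t (d.getD t 0 + 1)) PySem.Dict.empty).getD t 0
        = (inventory.count t : Int) := by
    intro t
    rw [PySem.Dict.getD_foldl_insert_add_one, PySem.Dict.getD_empty]; ring
  rw [PySem.Dict.items_eq_map_keys (PySem.Dict.ofList needed) hnd 0]
  generalize (PySem.Dict.ofList needed).keys = ks at hnd ⊢
  induction ks with
  | nil => simp
  | cons k ks ih =>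
    simp only [List.map_cons, List.filter_cons]
    by_cases h0 : 0 < (PySem.Dict.ofList needed).getD k 0
    · rw [if_pos (by simpa using h0), if_pos h0]
      simp only [List.map_cons, List.sum_cons]
      rw [ih (List.nodup_cons.mp hnd).2, hcnt k]
    · rw [if_neg (by simpa using h0), if_neg h0]
      simp only [List.sum_cons]
      rw [ih (List.nodup_cons.mp hnd).2]; ring

-- ===== VERDICT (by name: the statement is the Claim_ definition above) =====
theorem count_useful_py_spec : Claim_equal_count_useful_py := by
  intro inventory needed _
  unfold Spec_count_useful_py count_useful_py
  rw [alt_eq_cuS, loopA_eq _ _ _ (PySem.Dict.nodup_keys_ofList needed)]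
  ring
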